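-- pv_equiv track=rewrite | github.com/Guillaume-gillard/LEPL1401 | Session 05/05_hogwarts_sorting_hat.py | house_designation
-- ===== SOURCE A (Python) =====
-- knowledge = [['Gryffindor', ['brave', 'strong', 'bold']],
--              ['Ravenclaw', ['smart', 'wise', 'curious']],
--              ['Hufflepuff', ['loyal', 'patient', 'hard-working']],
--              ['Slytherin', ['cunning', 'wily', 'malignant']]]
--
-- def house_designation(student_qualities):
--     house_score = {"Gryffindor": 0, "Ravenclaw": 0, "Hufflepuff": 0, "Slytherin": 0}
--      # Attributing points to houses with regards to the student qualities
--     for quality in student_qualities: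
--         for house in knowledge :
--             if quality in house[1]:
--                 house_score[house[0]] += 1
--     # Sorting the houses
--     house_classement = sorted(house_score, key=house_score.get, reverse=True) # No brackets to get because we are just passing a reference to the method and not the result of the method
--     return house_classement
-- ===== SOURCE B (Python) =====
-- knowledge = [['Gryffindor', ['brave', 'strong', 'bold']],
--              ['Ravenclaw', ['smart', 'wise', 'curious']],
--              ['Hufflepuff', ['loyal', 'patient', 'hard-working']],
--              ['Slytherin', ['cunning', 'wily', 'malignant']]]
--
-- def house_designation(student_qualities):
--     # One pass over the qualities to build a multiplicity table, then one
--     # 3-term sum per house; stable ascending sort on the negated score keeps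
--     # the knowledge order on ties, exactly like sorted(..., reverse=True).
--     counts = {}
--     for q in student_qualities:
--         counts[q] = counts.get(q, 0) + 1
--     scored = [(sum(counts.get(q, 0) for q in qs), name) for name, qs in knowledge]
--     scored.sort(key=lambda t: -t[0])
--     return [name for _, name in scored]
-- ===== Notes on version B (the rewrite author's own statement) =====
-- stated objective: alternative
-- what changed: Instead of scanning all four houses' quality lists for every student quality, B builds a multiplicity table of the qualities in one pass, scores each house by summing the counts of its three qualities, and ranks by a stable ascending sort on the negated score.
import Mathlib
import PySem

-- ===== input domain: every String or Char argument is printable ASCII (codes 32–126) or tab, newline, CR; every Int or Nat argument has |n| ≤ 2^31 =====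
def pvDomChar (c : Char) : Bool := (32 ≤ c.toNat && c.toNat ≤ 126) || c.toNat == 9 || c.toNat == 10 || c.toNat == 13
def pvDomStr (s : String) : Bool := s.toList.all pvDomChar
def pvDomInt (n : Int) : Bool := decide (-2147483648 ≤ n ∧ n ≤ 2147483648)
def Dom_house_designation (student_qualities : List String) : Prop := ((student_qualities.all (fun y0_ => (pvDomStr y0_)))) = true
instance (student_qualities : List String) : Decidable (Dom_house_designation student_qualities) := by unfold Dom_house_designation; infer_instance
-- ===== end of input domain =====

-- B replaces A's per-quality scan of all four houses by a one-pass multiplicity table plus a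
-- per-house 3-term sum, ranking with a stable ascending sort on the negated score (alternative).

def knowledge : List (String × List String) :=
  [("Gryffindor", ["brave", "strong", "bold"]),
   ("Ravenclaw", ["smart", "wise", "curious"]),
   ("Hufflepuff", ["loyal", "patient", "hard-working"]),
   ("Slytherin", ["cunning", "wily", "malignant"])]

-- ===== PORT A =====
-- 'house_score[house[0]] += 1' is ported as Dict.modify; the key house[0] is always present
-- (all four names are initialized), so this is exact.  key=house_score.get is ported as getD
-- (every sorted key is a key of the dict, so .get never returns None).
def house_designation (student_qualities : List String) : List String :=
  let init : PySem.Dict String Int :=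
    ((((PySem.Dict.empty.insert "Gryffindor" 0).insert "Ravenclaw" 0).insert
        "Hufflepuff" 0).insert "Slytherin" 0)
  let house_score :=
    student_qualities.foldl (fun d quality =>
      knowledge.foldl (fun d house =>
        if quality ∈ house.2 then d.modify house.1 0 (· + 1) else d) d) init
  PySem.List.sorted house_score.keys (fun k => house_score.getD k 0) true

-- ===== PORT B =====
def house_designation_alt (student_qualities : List String) : List String :=
  let counts := student_qualities.foldl (fun d q => d.modify q 0 (· + 1))
                  (PySem.Dict.empty : PySem.Dict String Int)
  let scored := knowledge.map (fun h => (h.2.foldl (fun s q => s + counts.getD q 0) 0, h.1))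
  (PySem.List.sorted scored (fun t => -t.1) false).map (fun t => t.2)

-- ===== PRECONDITION & SPEC =====
def Spec_house_designation (student_qualities : List String) (out : List String) : Prop := out = house_designation_alt student_qualities
instance (student_qualities : List String) (out : List String) : Decidable (Spec_house_designation student_qualities out) := by unfold Spec_house_designation; infer_instance

-- ===== CLAIM (what is proved, stated in full; the proofs are below) =====
def Claim_equal_house_designation : Prop := ∀ (student_qualities : List String), Dom_house_designation student_qualities → Spec_house_designation student_qualities (house_designation student_qualities)

-- ===== LEMMAS AND PROOFS =====

/-- Occurrences of `sq`'s elements that lie in `qs` (A's score of a house, as an Int). -/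
def cntIn (qs : List String) (sq : List String) : Int :=
  (sq.countP (fun q => decide (q ∈ qs)) : Int)

/-- A's double loop keeps the four fixed keys and adds, per house, the number of
    quality occurrences belonging to that house. -/
lemma loopA (sq : List String) (g r h s : Int) :
    sq.foldl (fun d quality =>
      knowledge.foldl (fun d house =>
        if quality ∈ house.2 then d.modify house.1 0 (· + 1) else d) d)
      (PySem.Dict.mk [("Gryffindor",g),("Ravenclaw",r),("Hufflepuff",h),("Slytherin",s)])
    = PySem.Dict.mk [("Gryffindor", g + cntIn ["brave","strong","bold"] sq),
                     ("Ravenclaw", r + cntIn ["smart","wise","curious"] sq),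
                     ("Hufflepuff", h + cntIn ["loyal","patient","hard-working"] sq),
                     ("Slytherin", s + cntIn ["cunning","wily","malignant"] sq)] := by
  induction sq generalizing g r h s with
  | nil => simp [cntIn]
  | cons q tl ih =>
    rw [List.foldl_cons]
    have hstep : knowledge.foldl (fun d house =>
        if q ∈ house.2 then d.modify house.1 0 (· + 1) else d)
        (PySem.Dict.mk [("Gryffindor",g),("Ravenclaw",r),("Hufflepuff",h),("Slytherin",s)])
      = PySem.Dict.mk [("Gryffindor", g + (if q ∈ ["brave","strong","bold"] then 1 else 0)),
                       ("Ravenclaw", r + (if q ∈ ["smart","wise","curious"] then 1 else 0)),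
                       ("Hufflepuff", h + (if q ∈ ["loyal","patient","hard-working"] then 1 else 0)),
                       ("Slytherin", s + (if q ∈ ["cunning","wily","malignant"] then 1 else 0))] := by
      simp only [knowledge, List.foldl]
      split_ifs <;> (try simp only [add_zero]) <;> rfl
    rw [hstep, ih]
    simp only [cntIn, List.countP_cons, PySem.Dict.mk.injEq, List.cons.injEq, Prod.mk.injEq, and_true]
    push_cast
    clear ih
    split_ifs <;> simp_all only [decide_eq_true_eq, true_and] <;> try omega

/-- For three pairwise distinct strings, counting members of `[a,b,c]` is the sum of the
    three individual multiplicities (B's score of a house). -/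
lemma cnt3 (a b c : String) (hab : a ≠ b) (hac : a ≠ c) (hbc : b ≠ c) (sq : List String) :
    cntIn [a, b, c] sq = (sq.count a : Int) + sq.count b + sq.count c := by
  induction sq with
  | nil => simp [cntIn]
  | cons q tl ih =>
    simp only [cntIn, List.countP_cons, List.count_cons] at *
    push_cast at *
    by_cases h1 : q = a <;> by_cases h2 : q = b <;> by_cases h3 : q = c <;>
      simp_all only [decide_eq_true_eq, List.mem_cons, List.not_mem_nil, or_false,
        beq_iff_eq, beq_self_eq_true] <;> simp_all <;> omega

set_option maxHeartbeats 4000000 in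
/-- Python's stable `sorted(..., reverse=True)` on the four keys equals a stable ascending
    sort of the (score, name) pairs on the negated score, projected to the names. -/
lemma sort4 (g r h s : Int) :
    PySem.List.sorted ["Gryffindor","Ravenclaw","Hufflepuff","Slytherin"]
      (fun k => (PySem.Dict.mk [("Gryffindor",g),("Ravenclaw",r),("Hufflepuff",h),("Slytherin",s)]).getD k 0) true
    = (PySem.List.sorted [(g,"Gryffindor"),(r,"Ravenclaw"),(h,"Hufflepuff"),(s,"Slytherin")]
        (fun t : Int × String => -t.1) false).map (fun t => t.2) := by
  rw [PySem.List.sorted_rev_eq_foldl_insertBy, PySem.List.sorted_eq_foldl_insertBy]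
  simp only [List.foldl, PySem.List.insertBy, PySem.Dict.getD_eq_get?_getD,
    PySem.Dict.get?_mk_cons, String.reduceBEq, if_true, Option.getD_some]
  split_ifs <;> (try simp_all [PySem.List.insertBy]) <;> (try split_ifs) <;>
    (try simp_all [PySem.List.insertBy]) <;> (try split_ifs) <;>
    (try simp_all [PySem.List.insertBy]) <;> (try split_ifs) <;> (try simp_all) <;> omega

-- ===== VERDICT (by name: the statement is the Claim_ definition above) =====
theorem house_designation_spec : Claim_equal_house_designation := by
  intro sq _
  unfold Spec_house_designation
  simp only [house_designation, house_designation_alt]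
  have hinit : ((((PySem.Dict.empty.insert "Gryffindor" (0:Int)).insert "Ravenclaw" 0).insert
      "Hufflepuff" 0).insert "Slytherin" 0)
      = PySem.Dict.mk [("Gryffindor",0),("Ravenclaw",0),("Hufflepuff",0),("Slytherin",0)] := rfl
  rw [hinit, loopA, ← PySem.Dict.counter_eq_foldl]
  simp only [zero_add, PySem.Dict.keys_mk, List.map_cons, List.map_nil, knowledge,
    List.foldl, PySem.Dict.getD_counter]
  rw [sort4]
  rw [cnt3 _ _ _ (by decide) (by decide) (by decide), cnt3 _ _ _ (by decide) (by decide) (by decide),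
      cnt3 _ _ _ (by decide) (by decide) (by decide), cnt3 _ _ _ (by decide) (by decide) (by decide)]
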